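-- pv_equiv track=rewrite | github.com/miliar/Code_Jam_Webscraper | solutions_python/solutions_year17_round1_nr1/201.py | solve
-- ===== SOURCE A (Python) =====
-- def solve(rows, cols, grid):
--     for r in range(rows):
--         for c in range(cols):
--             initial = grid[r][c]
--             if initial != '?':
--                 d = r
--                 while d+1 < rows and grid[d+1][c] == '?':
--                     grid[d+1][c] = initial
--                     d += 1
--
--     for r in range(rows-1, -1, -1):
--         for c in range(cols):
--             initial = grid[r][c]
--             if initial != '?':
--                 d = r
--                 while d-1 >= 0 and grid[d-1][c] == '?':
--                     grid[d-1][c] = initial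
--                     d -= 1
--
--     for r in range(rows-1, -1, -1):
--         for c in range(cols-1, -1, -1):
--             initial = grid[r][c]
--             if initial != '?':
--                 d = c
--                 while d-1 >= 0 and grid[r][d-1] == '?':
--                     grid[r][d-1] = initial
--                     d -= 1
--
--     for r in range(rows):
--         for c in range(cols-1, -1, -1):
--             initial = grid[r][c]
--             if initial != '?':
--                 d = c
--                 while d+1 < cols and grid[r][d+1] == '?':
--                     grid[r][d+1] = initial
--                     d += 1
--
--     return grid
-- ===== SOURCE B (Python) =====
-- # B: replaces A's four source-propagating nested-while passes by linear "carry the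
-- # last seen letter" scans: each column is filled top-to-bottom then bottom-to-top,
-- # each row right-to-left then left-to-right (same above>below, right>left preference).
-- # Like A it mutates grid in place and returns it.
-- def solve(rows, cols, grid):
--     if rows <= 0 or cols <= 0:
--         return grid
--
--     def fill(line):
--         out = []
--         last = None
--         for x in line:
--             if x != '?':
--                 last = x
--                 out.append(x)
--             else:
--                 out.append(last if last is not None else '?')
--         return out
--
--     for c in range(cols):
--         col = [grid[r][c] for r in range(rows)]
--         col = fill(col)                  # carry letters downward (nearest above wins)
--         col = fill(col[::-1])[::-1]      # then fill the remaining top '?' from below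
--         for r in range(rows):
--             grid[r][c] = col[r]
--
--     for r in range(rows):
--         row = grid[r][:cols]
--         row = fill(row[::-1])[::-1]      # carry letters leftward (nearest right wins)
--         row = fill(row)                  # then fill the remaining right '?' from left
--         grid[r][:cols] = row
--
--     return grid
-- ===== Notes on version B (the rewrite author's own statement) =====
-- stated objective: simpler
-- what changed: A's four passes each scan every cell and run a nested while loop that propagates the source letter cell-by-cell through the grid; B instead does one linear carry scan per column (down, then up) and per row (from the right, then from the left), keeping only the last seen letter, with no nested propagation loops.
import Mathlib
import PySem

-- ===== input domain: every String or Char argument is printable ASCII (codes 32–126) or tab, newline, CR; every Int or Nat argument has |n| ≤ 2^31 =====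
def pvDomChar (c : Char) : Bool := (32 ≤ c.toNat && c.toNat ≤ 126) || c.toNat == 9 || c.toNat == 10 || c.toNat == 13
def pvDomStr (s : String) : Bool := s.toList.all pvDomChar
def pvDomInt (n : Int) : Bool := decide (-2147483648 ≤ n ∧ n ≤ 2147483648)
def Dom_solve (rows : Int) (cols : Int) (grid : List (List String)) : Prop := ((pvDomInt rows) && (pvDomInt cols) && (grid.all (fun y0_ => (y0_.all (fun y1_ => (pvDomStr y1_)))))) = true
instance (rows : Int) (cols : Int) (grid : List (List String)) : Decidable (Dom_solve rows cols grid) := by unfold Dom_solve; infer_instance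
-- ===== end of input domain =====

-- B replaces A's four source-propagating nested-while passes by linear carry scans
-- (objective: simpler); both Pythons mutate `grid` in place the same way, so the
-- equivalence proved here about the returned value covers the side effect too.

-- ===== PORT A =====
-- shared primitives for Python's grid[r][c] reads/writes (indices here are always ≥ 0)
def getCell (g : List (List String)) (r c : Nat) : String := (g.getD r []).getD c ""
def setCell (g : List (List String)) (r c : Nat) (v : String) : List (List String) :=
  g.modify r (fun row => row.set c v)

-- while d+1 < rows and grid[d+1][c] == '?': grid[d+1][c] = initial; d += 1
def whileDown (g : List (List String)) (c d n : Nat) (v : String) : List (List String) :=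
  if _h : d + 1 < n then
    if getCell g (d+1) c = "?" then whileDown (setCell g (d+1) c v) c (d+1) n v else g
  else g
termination_by n - d
decreasing_by omega

-- while d-1 >= 0 and grid[d-1][c] == '?': grid[d-1][c] = initial; d -= 1
def whileUp (g : List (List String)) (c d : Nat) (v : String) : List (List String) :=
  match d with
  | 0 => g
  | d' + 1 => if getCell g d' c = "?" then whileUp (setCell g d' c v) c d' v else g

-- while d-1 >= 0 and grid[r][d-1] == '?': grid[r][d-1] = initial; d -= 1
def whileLeft (g : List (List String)) (r d : Nat) (v : String) : List (List String) :=
  match d with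
  | 0 => g
  | d' + 1 => if getCell g r d' = "?" then whileLeft (setCell g r d' v) r d' v else g

-- while d+1 < cols and grid[r][d+1] == '?': grid[r][d+1] = initial; d += 1
def whileRight (g : List (List String)) (r d m : Nat) (v : String) : List (List String) :=
  if _h : d + 1 < m then
    if getCell g r (d+1) = "?" then whileRight (setCell g r (d+1) v) r (d+1) m v else g
  else g
termination_by m - d
decreasing_by omega

def solve (rows : Int) (cols : Int) (grid : List (List String)) : List (List String) :=
  let n := rows.toNat
  let m := cols.toNat
  let g1 := (List.range n).foldl (fun g r => (List.range m).foldl (fun g c =>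
      let i := getCell g r c; if i ≠ "?" then whileDown g c r n i else g) g) grid
  let g2 := (List.range n).reverse.foldl (fun g r => (List.range m).foldl (fun g c =>
      let i := getCell g r c; if i ≠ "?" then whileUp g c r i else g) g) g1
  let g3 := (List.range n).reverse.foldl (fun g r => (List.range m).reverse.foldl (fun g c =>
      let i := getCell g r c; if i ≠ "?" then whileLeft g r c i else g) g) g2
  let g4 := (List.range n).foldl (fun g r => (List.range m).reverse.foldl (fun g c =>
      let i := getCell g r c; if i ≠ "?" then whileRight g r c m i else g) g) g3
  g4

-- ===== PORT B =====
-- linear scan carrying the last seen letter (Source B's fill)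
def fillLine (line : List String) : List String :=
  (line.foldl (fun (acc : List String × Option String) x =>
      if x ≠ "?" then (acc.1 ++ [x], some x)
      else (acc.1 ++ [acc.2.getD "?"], acc.2)) (([] : List String), (none : Option String))).1

def solve_alt (rows : Int) (cols : Int) (grid : List (List String)) : List (List String) :=
  if rows ≤ 0 ∨ cols ≤ 0 then grid else
  let n := rows.toNat
  let m := cols.toNat
  let gv := (List.range m).foldl (fun g c =>
      let col0 := (List.range n).map (fun r => getCell g r c)
      let col1 := fillLine col0
      let col2 := (fillLine col1.reverse).reverse
      (List.range n).foldl (fun g r => setCell g r c (col2.getD r "?")) g) grid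
  (List.range n).foldl (fun g r =>
      let row0 := (g.getD r []).take m
      let row1 := (fillLine row0.reverse).reverse
      let row2 := fillLine row1
      g.modify r (fun old => row2 ++ old.drop m)) gv

-- ===== PRECONDITION & SPEC =====
-- Pre_solve is exactly A's no-crash condition: with rows > 0 and cols > 0, A indexes
-- grid[r][c] for all r < rows, c < cols (IndexError otherwise); with rows ≤ 0 or
-- cols ≤ 0 every loop body is empty and A returns grid unchanged for any grid.
def Pre_solve (rows : Int) (cols : Int) (grid : List (List String)) : Prop :=
  rows ≤ 0 ∨ cols ≤ 0 ∨
    (rows.toNat ≤ grid.length ∧ ∀ r < rows.toNat, cols.toNat ≤ (grid.getD r []).length)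
instance (rows : Int) (cols : Int) (grid : List (List String)) : Decidable (Pre_solve rows cols grid) := by
  unfold Pre_solve; infer_instance

def pvWitness_solve : Int × Int × List (List String) := (2, 3, [["?", "b", "?"], ["a", "?", "?"]])

def Spec_solve (rows : Int) (cols : Int) (grid : List (List String)) (out : List (List String)) : Prop := out = solve_alt rows cols grid
instance (rows : Int) (cols : Int) (grid : List (List String)) (out : List (List String)) : Decidable (Spec_solve rows cols grid out) := by unfold Spec_solve; infer_instance

-- ===== CLAIM (what is proved, stated in full; the proofs are below) =====
def Claim_equal_solve : Prop := ∀ (rows : Int) (cols : Int) (grid : List (List String)), Dom_solve rows cols grid → Pre_solve rows cols grid → Spec_solve rows cols grid (solve rows cols grid)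

-- ===== LEMMAS AND PROOFS =====
-- ---------- 1D machinery ----------

-- carry scan with initial carry
def fillWith : Option String → List String → List String
  | _, [] => []
  | v, x :: t => if x ≠ "?" then x :: fillWith (some x) t else v.getD "?" :: fillWith v t

-- fill the leading run of '?' with the carried letter, at most k cells
def runFill : Option String → Nat → List String → List String
  | none, _, s => s
  | some _, 0, s => s
  | some _, _+1, [] => []
  | some v, k+1, x :: t => if x = "?" then v :: runFill (some v) k t else x :: t

-- 1D mirrors of A's while loops and source steps
def w1F (ℓ : List String) (d N : Nat) (v : String) : List String :=
  if _h : d + 1 < N then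
    if ℓ.getD (d+1) "" = "?" then w1F (ℓ.set (d+1) v) (d+1) N v else ℓ
  else ℓ
termination_by N - d
decreasing_by omega

def w1B (ℓ : List String) (d : Nat) (v : String) : List String :=
  match d with
  | 0 => ℓ
  | d' + 1 => if ℓ.getD d' "" = "?" then w1B (ℓ.set d' v) d' v else ℓ

def stepF (N : Nat) (ℓ : List String) (b : Nat) : List String :=
  let i := ℓ.getD b ""; if i ≠ "?" then w1F ℓ b N i else ℓ

def stepB (ℓ : List String) (b : Nat) : List String :=
  let i := ℓ.getD b ""; if i ≠ "?" then w1B ℓ b i else ℓ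

theorem length_fillWith (v : Option String) (s : List String) :
    (fillWith v s).length = s.length := by
  induction s generalizing v with
  | nil => rfl
  | cons x t ih => simp only [fillWith]; split <;> simp [ih]

theorem runFill_zero (v : Option String) (s : List String) : runFill v 0 s = s := by
  cases v <;> rfl

theorem length_w1B (ℓ : List String) (d : Nat) (v : String) :
    (w1B ℓ d v).length = ℓ.length := by
  induction d generalizing ℓ with
  | zero => rfl
  | succ d ih =>
    simp only [w1B]
    split
    · rw [ih]; simp
    · rfl

theorem length_stepB (ℓ : List String) (b : Nat) :
    (stepB ℓ b).length = ℓ.length := by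
  simp only [stepB]; split
  · exact length_w1B ..
  · rfl

theorem fillLine_eq_aux (s : List String) : ∀ (acc : List String) (v : Option String),
    (s.foldl (fun (acc : List String × Option String) x =>
      if x ≠ "?" then (acc.1 ++ [x], some x)
      else (acc.1 ++ [acc.2.getD "?"], acc.2)) (acc, v)).1 = acc ++ fillWith v s := by
  induction s with
  | nil => intro acc v; simp [fillWith]
  | cons x t ih =>
    intro acc v
    rw [List.foldl_cons]
    by_cases h : x = "?"
    · rw [if_neg (by simp [h])]
      subst h
      rw [fillWith, if_neg (by simp)]
      exact (ih (acc ++ [v.getD "?"]) v).trans (by simp)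
    · rw [if_pos h]
      rw [fillWith, if_pos h]
      exact (ih (acc ++ [x]) (some x)).trans (by simp)

theorem fillLine_eq (s : List String) : fillLine s = fillWith none s := by
  rw [fillLine]
  exact (fillLine_eq_aux s [] none).trans (by simp)

theorem set_append_len (Q : List String) (x v : String) (t : List String) :
    (Q ++ x :: t).set Q.length v = Q ++ v :: t := by
  rw [List.set_append]
  simp

theorem getD_append_len (Q t : List String) (d : String) :
    (Q ++ t).getD Q.length d = t.getD 0 d := by
  rw [List.getD_append_right _ _ _ _ (le_refl _)]
  simp

-- A's forward while loop fills the leading '?' run after the source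
theorem w1F_run (t : List String) : ∀ (Q : List String) (d N : Nat) (v : String),
    Q.length = d + 1 → w1F (Q ++ t) d N v = Q ++ runFill (some v) (N - (d+1)) t := by
  induction t with
  | nil =>
    intro Q d N v hQ
    rw [w1F]
    split
    · rename_i h
      have : (Q ++ ([] : List String)).getD (d+1) "" = "" := by
        rw [← hQ, getD_append_len]; rfl
      rw [this]
      simp only [if_neg (by decide : ¬("" : String) = "?")]
      cases hk : N - (d+1) with
      | zero => simp [runFill_zero]
      | succ k => simp [runFill]
    · have : N - (d+1) = 0 := by omega
      rw [this, runFill_zero]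
  | cons x t' ih =>
    intro Q d N v hQ
    rw [w1F]
    split
    · rename_i h
      have hget : (Q ++ x :: t').getD (d+1) "" = x := by
        rw [← hQ, getD_append_len]; rfl
      rw [hget]
      have hk : N - (d+1) = (N - (d+2)) + 1 := by omega
      by_cases hx : x = "?"
      · subst hx
        simp only [if_pos rfl]
        have hset : (Q ++ "?" :: t').set (d+1) v = (Q ++ [v]) ++ t' := by
          rw [← hQ, set_append_len]; simp
        rw [hset, ih (Q ++ [v]) (d+1) N v (by simp [hQ])]
        rw [hk]
        simp [runFill]
      · rw [if_neg hx, hk]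
        simp [runFill, hx]
    · have : N - (d+1) = 0 := by omega
      rw [this, runFill_zero]

theorem runFill_idem (k : Nat) (v : String) : ∀ t : List String,
    runFill (some v) k (runFill (some v) k t) = runFill (some v) k t := by
  induction k with
  | zero => intro t; simp [runFill_zero]
  | succ k ih =>
    intro t
    cases t with
    | nil => rfl
    | cons x t' =>
      by_cases hx : x = "?"
      · subst hx
        simp only [runFill, if_pos rfl]
        by_cases hv : v = "?"
        · subst hv; simp [runFill, ih]
        · simp [runFill, hv, ih]
      · simp [runFill, hx]

theorem stepF_eq (N : Nat) (ℓ : List String) (b : Nat) :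
    stepF N ℓ b = if ℓ.getD b "" ≠ "?" then w1F ℓ b N (ℓ.getD b "") else ℓ := rfl

theorem stepB_eq (ℓ : List String) (b : Nat) :
    stepB ℓ b = if ℓ.getD b "" ≠ "?" then w1B ℓ b (ℓ.getD b "") else ℓ := rfl

theorem runFill_none (k : Nat) (s : List String) : runFill none k s = s := by
  simp [runFill]

theorem stepF_skip (N : Nat) (ℓ : List String) (b : Nat) (hq : ℓ.getD b "" = "?") :
    stepF N ℓ b = ℓ := by
  rw [stepF_eq, hq]
  simp

theorem stepF_src (N : Nat) (ℓ : List String) (b : Nat) (x : String)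
    (hx : ℓ.getD b "" = x) (hne : x ≠ "?") : stepF N ℓ b = w1F ℓ b N x := by
  rw [stepF_eq, hx, if_pos hne]

theorem stepB_skip (ℓ : List String) (b : Nat) (hq : ℓ.getD b "" = "?") :
    stepB ℓ b = ℓ := by
  rw [stepB_eq, hq]
  simp

theorem stepB_src (ℓ : List String) (b : Nat) (x : String)
    (hx : ℓ.getD b "" = x) (hne : x ≠ "?") : stepB ℓ b = w1B ℓ b x := by
  rw [stepB_eq, hx, if_pos hne]

theorem fillWith_q (v : Option String) (t : List String) :
    fillWith v ("?" :: t) = v.getD "?" :: fillWith v t := by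
  rw [fillWith]; simp

theorem fillWith_s (v : Option String) (x : String) (hx : x ≠ "?") (t : List String) :
    fillWith v (x :: t) = x :: fillWith (some x) t := by
  rw [fillWith, if_pos hx]

theorem runFill_fillWith (v : String) : ∀ (S T : List String),
    runFill (some v) S.length (fillWith none S ++ T) = fillWith (some v) S ++ T := by
  intro S
  induction S with
  | nil => intro T; simp [runFill_zero, fillWith]
  | cons x t ih =>
    intro T
    by_cases hx : x = "?"
    · subst hx
      rw [fillWith_q, fillWith_q]
      simp only [Option.getD_some, Option.getD_none, List.cons_append, List.length_cons,
        runFill, if_pos rfl, if_true]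
      rw [ih T]
    · rw [fillWith_s _ _ hx, fillWith_s _ _ hx]
      simp [runFill, hx]

-- the master invariant for a forward pass with ascending sources:
-- P = finished prefix, S = rest, v = carried letter, k = sources still to process
theorem invF (N : Nat) : ∀ (k a : Nat) (v : Option String) (P S : List String),
    P.length = a → a + k = N → k ≤ S.length → (∀ u, v = some u → u ≠ "?") →
    (List.range' a k).foldl (stepF N) (P ++ runFill v k S) =
      P ++ fillWith v (S.take k) ++ S.drop k := by
  intro k
  induction k with
  | zero =>
    intro a v P S hP hN hS hv
    simp [runFill_zero, fillWith]
  | succ k ih =>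
    intro a v P S hP hN hS hv
    cases S with
    | nil => simp at hS
    | cons x t =>
      rw [List.range'_succ, List.foldl_cons]
      have hkN : N - (a+1) = k := by omega
      cases v with
      | none =>
        rw [runFill_none]
        by_cases hx : x = "?"
        · subst hx
          rw [stepF_skip N _ a (by rw [← hP, getD_append_len]; rfl)]
          rw [show (P ++ "?" :: t) = (P ++ ["?"]) ++ t by simp]
          have := ih (a+1) none (P ++ ["?"]) t (by simp [hP]) (by omega) (by simpa using hS)
            (by intro u h; cases h)
          rw [runFill_none] at this
          rw [this, List.take_succ_cons, List.drop_succ_cons, fillWith_q]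
          simp
        · rw [stepF_src N _ a x (by rw [← hP, getD_append_len]; rfl) hx]
          rw [show (P ++ x :: t) = (P ++ [x]) ++ t by simp]
          rw [w1F_run t (P ++ [x]) a N x (by simp [hP]), hkN]
          have := ih (a+1) (some x) (P ++ [x]) t (by simp [hP]) (by omega) (by simpa using hS)
            (by intro u h; cases h; exact hx)
          rw [this, List.take_succ_cons, List.drop_succ_cons, fillWith_s _ _ hx]
          simp
      | some u =>
        have hu : u ≠ "?" := hv u rfl
        by_cases hx : x = "?"
        · subst hx
          rw [show runFill (some u) (k+1) ("?" :: t) = u :: runFill (some u) k t from by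
            simp [runFill]]
          rw [stepF_src N _ a u (by rw [← hP, getD_append_len]; rfl) hu]
          rw [show (P ++ u :: runFill (some u) k t) = (P ++ [u]) ++ runFill (some u) k t by simp]
          rw [w1F_run _ (P ++ [u]) a N u (by simp [hP]), hkN, runFill_idem]
          have := ih (a+1) (some u) (P ++ [u]) t (by simp [hP]) (by omega) (by simpa using hS) hv
          rw [this, List.take_succ_cons, List.drop_succ_cons, fillWith_q]
          simp
        · rw [runFill, if_neg hx]
          rw [stepF_src N _ a x (by rw [← hP, getD_append_len]; rfl) hx]
          rw [show (P ++ x :: t) = (P ++ [x]) ++ t by simp]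
          rw [w1F_run t (P ++ [x]) a N x (by simp [hP]), hkN]
          have := ih (a+1) (some x) (P ++ [x]) t (by simp [hP]) (by omega) (by simpa using hS)
            (by intro w h; cases h; exact hx)
          rw [this, List.take_succ_cons, List.drop_succ_cons, fillWith_s _ _ hx]
          simp

-- specialisation used for A's pass 1 (sources 0..n-1, bound n)
theorem passAscF_char (n : Nat) (ℓ : List String) (h : n ≤ ℓ.length) :
    (List.range n).foldl (stepF n) ℓ = fillWith none (ℓ.take n) ++ ℓ.drop n := by
  have h0 : runFill none n ℓ = ℓ := runFill_none ..
  have := invF n n 0 none [] ℓ rfl (by omega) h (by intro u h; cases h)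
  rw [h0] at this
  simpa [List.range_eq_range'] using this

-- the master invariant for a forward pass with descending sources (A's pass 4)
theorem invDF (N : Nat) : ∀ (b : Nat) (P S T : List String),
    P.length = b → b + S.length = N →
    ((List.range b).reverse).foldl (stepF N) (P ++ (fillWith none S ++ T)) =
      fillWith none (P ++ S) ++ T := by
  intro b
  induction b with
  | zero =>
    intro P S T hP hN
    rw [List.length_eq_zero_iff.mp hP]
    simp
  | succ b ih =>
    intro P S T hP hN
    obtain ⟨P', x, rfl⟩ : ∃ P' x, P = P' ++ [x] := by
      rcases List.eq_nil_or_concat P with h | ⟨P', x, h⟩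
      · subst h; simp at hP
      · exact ⟨P', x, by simpa [List.concat_eq_append] using h⟩
    have hP' : P'.length = b := by simpa using hP
    rw [List.range_succ, List.reverse_append, List.reverse_singleton, List.singleton_append,
      List.foldl_cons]
    have hgd : ∀ s : List String, ((P' ++ [x]) ++ s).getD b "" = x := by
      intro s
      rw [List.append_assoc, ← hP', getD_append_len]
      rfl
    by_cases hx : x = "?"
    · subst hx
      rw [stepF_skip N _ b (hgd _)]
      have heq : (P' ++ ["?"]) ++ (fillWith none S ++ T) = P' ++ (fillWith none ("?" :: S) ++ T) := by
        rw [fillWith_q]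
        simp
      rw [heq, ih P' ("?" :: S) T hP' (by simp only [List.length_cons]; omega)]
      simp
    · rw [stepF_src N _ b x (hgd _) hx]
      rw [w1F_run _ (P' ++ [x]) b N x (by simp [hP'])]
      have hlen : N - (b + 1) = S.length := by omega
      rw [hlen, runFill_fillWith]
      have heq : (P' ++ [x]) ++ (fillWith (some x) S ++ T) = P' ++ (fillWith none (x :: S) ++ T) := by
        rw [fillWith_s _ _ hx]
        simp
      rw [heq, ih P' (x :: S) T hP' (by simp only [List.length_cons]; omega)]
      simp

theorem passDescF_char (N : Nat) (ℓ : List String) (h : N ≤ ℓ.length) :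
    ((List.range N).reverse).foldl (stepF N) ℓ = fillWith none (ℓ.take N) ++ ℓ.drop N := by
  have := invDF N N (ℓ.take N) [] (ℓ.drop N) (by rw [List.length_take]; omega) (by simp)
  simpa [fillWith, List.take_append_drop] using this

theorem reverse_set (ℓ : List String) (i : Nat) (v : String) (h : i < ℓ.length) :
    (ℓ.set i v).reverse = ℓ.reverse.set (ℓ.length - 1 - i) v := by
  apply List.ext_getElem
  · simp
  · intro j h1 h2
    simp only [List.length_reverse, List.length_set] at h1 h2
    rw [List.getElem_reverse]
    simp only [List.getElem_set, List.length_set]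
    rw [List.getElem_reverse]
    by_cases hij : j = ℓ.length - 1 - i
    · rw [if_pos (by omega), if_pos (by omega)]
    · rw [if_neg (by omega), if_neg (by omega)]

theorem getD_reverse (ℓ : List String) (i : Nat) (h : i < ℓ.length) :
    ℓ.reverse.getD (ℓ.length - 1 - i) "" = ℓ.getD i "" := by
  rw [List.getD_eq_getElem _ _ (by simp only [List.length_reverse]; omega),
    List.getD_eq_getElem _ _ h, List.getElem_reverse]
  congr 1
  omega

theorem conj_w1B (d : Nat) : ∀ (ℓ : List String) (v : String), d < ℓ.length →
    w1B ℓ d v = (w1F ℓ.reverse (ℓ.length - 1 - d) ℓ.length v).reverse := by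
  induction d with
  | zero =>
    intro ℓ v h
    rw [w1B, w1F]
    rw [dif_neg (by omega)]
    rw [List.reverse_reverse]
  | succ d ih =>
    intro ℓ v h
    rw [w1B, w1F]
    rw [dif_pos (by omega)]
    have he : ℓ.length - 1 - (d + 1) + 1 = ℓ.length - 1 - d := by omega
    rw [he, getD_reverse ℓ d (by omega)]
    by_cases hq : ℓ.getD d "" = "?"
    · rw [if_pos hq, if_pos hq]
      rw [← reverse_set ℓ d v (by omega)]
      have hlen : ℓ.length = (ℓ.set d v).length := by simp
      rw [show ℓ.length - 1 - d = (ℓ.set d v).length - 1 - d by simp, hlen]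
      exact ih (ℓ.set d v) v (by simp; omega)
    · rw [if_neg hq, if_neg hq, List.reverse_reverse]

theorem conj_stepB (ℓ : List String) (b : Nat) (h : b < ℓ.length) :
    stepB ℓ b = (stepF ℓ.length ℓ.reverse (ℓ.length - 1 - b)).reverse := by
  rw [stepB_eq, stepF_eq, getD_reverse ℓ b h]
  by_cases hq : ℓ.getD b "" = "?"
  · rw [if_neg (by rw [hq]; simp), if_neg (by rw [hq]; simp), List.reverse_reverse]
  · rw [if_pos hq, if_pos hq]
    exact conj_w1B b ℓ _ h

theorem conj_fold (rs : List Nat) : ∀ (ℓ : List String), (∀ r ∈ rs, r < ℓ.length) →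
    rs.foldl stepB ℓ =
      ((rs.map (fun r => ℓ.length - 1 - r)).foldl (stepF ℓ.length) ℓ.reverse).reverse := by
  induction rs with
  | nil => intro ℓ _; rw [List.map_nil, List.foldl_nil, List.foldl_nil, List.reverse_reverse]
  | cons r rs ih =>
    intro ℓ hmem
    rw [List.foldl_cons, List.map_cons, List.foldl_cons]
    have hr : r < ℓ.length := hmem r (by simp)
    have hlen : (stepB ℓ r).length = ℓ.length := length_stepB ..
    have := ih (stepB ℓ r) (by intro a ha; rw [hlen]; exact hmem a (by simp [ha]))
    rw [this, hlen]
    congr 2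
    rw [conj_stepB ℓ r hr, List.reverse_reverse]

theorem maprev (n : Nat) : ∀ (L : Nat), n ≤ L →
    (List.range n).reverse.map (fun r => L - 1 - r) = List.range' (L - n) n := by
  induction n with
  | zero => intro L _; rfl
  | succ n ih =>
    intro L h
    rw [List.range_succ, List.reverse_append, List.reverse_singleton, List.singleton_append,
      List.map_cons, ih L (by omega), List.range'_succ]
    have h1 : L - (n+1) + 1 = L - n := by omega
    rw [h1, show L - 1 - n = L - (n+1) from by omega]

-- characterisation of a backward pass with descending sources (A's passes 2 and 3)
theorem passDescB_char (n : Nat) (ℓ : List String) (h : n ≤ ℓ.length) :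
    (List.range n).reverse.foldl stepB ℓ =
      (fillWith none ((ℓ.take n).reverse)).reverse ++ ℓ.drop n := by
  have hmem : ∀ r ∈ (List.range n).reverse, r < ℓ.length := by
    intro r hr; rw [List.mem_reverse, List.mem_range] at hr; omega
  rw [conj_fold _ ℓ hmem, maprev n ℓ.length h]
  have hS : ((ℓ.take n).reverse).length = n := by simp; omega
  have hinv := invF ℓ.length n (ℓ.length - n) none ((ℓ.drop n).reverse) ((ℓ.take n).reverse)
    (by simp) (by omega) (by rw [hS]) (by intro u hu; cases hu)
  rw [runFill_none] at hinv
  rw [show ℓ.reverse = (ℓ.drop n).reverse ++ (ℓ.take n).reverse from by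
    rw [← List.reverse_append, List.take_append_drop]]
  rw [hinv, List.take_of_length_le (l := (ℓ.take n).reverse) (by rw [hS]),
    List.drop_of_length_le (l := (ℓ.take n).reverse) (by rw [hS])]
  simp [List.reverse_append]


-- ---------- 2D projections ----------

def colp (g : List (List String)) (c : Nat) : List String := g.map (fun row => row.getD c "")
def rowp (g : List (List String)) (r : Nat) : List String := g.getD r []

def dimsEq (g h : List (List String)) : Prop :=
  g.length = h.length ∧ ∀ r, (g.getD r []).length = (h.getD r []).length

def Shape (g : List (List String)) (n m : Nat) : Prop :=
  n ≤ g.length ∧ ∀ r < n, m ≤ (g.getD r []).length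

theorem dimsEq_refl (g : List (List String)) : dimsEq g g := ⟨rfl, fun _ => rfl⟩

theorem dimsEq_trans {g h k : List (List String)} (h1 : dimsEq g h) (h2 : dimsEq h k) :
    dimsEq g k := ⟨h1.1.trans h2.1, fun r => (h1.2 r).trans (h2.2 r)⟩

theorem Shape_of_dimsEq {g g' : List (List String)} {n m : Nat}
    (hd : dimsEq g' g) (hs : Shape g n m) : Shape g' n m :=
  ⟨hd.1 ▸ hs.1, fun r hr => (hd.2 r) ▸ hs.2 r hr⟩

theorem length_colp (g : List (List String)) (c : Nat) : (colp g c).length = g.length := by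
  simp [colp]

theorem getCell_colp (g : List (List String)) (r c : Nat) :
    getCell g r c = (colp g c).getD r "" := by
  unfold getCell colp
  rcases lt_or_ge r g.length with h | h
  · rw [List.getD_eq_getElem (List.map _ g) "" (by simpa using h), List.getElem_map,
      List.getD_eq_getElem g [] h]
  · rw [List.getD_eq_getElem?_getD (l := g), List.getElem?_eq_none (by omega),
      List.getD_eq_getElem?_getD (l := List.map _ g), List.getElem?_eq_none (by simpa using h)]
    rfl

theorem getCell_rowp (g : List (List String)) (r c : Nat) :
    getCell g r c = (rowp g r).getD c "" := rfl

theorem length_setCell (g : List (List String)) (r c : Nat) (v : String) :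
    (setCell g r c v).length = g.length := by
  simp [setCell]

theorem rowp_setCell (g : List (List String)) (r c : Nat) (v : String) (r' : Nat) :
    rowp (setCell g r c v) r' = if r' = r then (rowp g r).set c v else rowp g r' := by
  unfold rowp setCell
  rw [List.getD_eq_getElem?_getD (l := g.modify r _), List.getElem?_modify]
  rcases lt_or_ge r' g.length with hlt | hge
  · rw [List.getElem?_eq_getElem hlt]
    by_cases h : r' = r
    · subst h
      simp [List.getD_eq_getElem _ _ hlt, List.getElem?_eq_getElem hlt]
    · simp only [Option.map_eq_map, Option.map_some, Option.getD_some,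
        if_neg (show r ≠ r' from fun hx => h hx.symm), if_neg h]
      rw [List.getD_eq_getElem _ _ hlt]
  · rw [List.getElem?_eq_none (by omega)]
    by_cases h : r' = r
    · subst h
      rw [if_pos rfl]
      rw [List.getD_eq_getElem?_getD (l := g), List.getElem?_eq_none (by omega)]
      simp
    · rw [if_neg h]
      rw [List.getD_eq_getElem?_getD (l := g), List.getElem?_eq_none (by omega)]
      simp

theorem dimsEq_setCell (g : List (List String)) (r c : Nat) (v : String) :
    dimsEq (setCell g r c v) g := by
  refine ⟨length_setCell .., fun r' => ?_⟩
  have := rowp_setCell g r c v r'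
  unfold rowp at this
  rw [this]
  by_cases h : r' = r
  · subst h; simp
  · rw [if_neg h]

theorem colp_setCell_self (g : List (List String)) (r c : Nat) (v : String)
    (hr : r < g.length) (hc : c < (g.getD r []).length) :
    colp (setCell g r c v) c = (colp g c).set r v := by
  apply List.ext_getElem
  · simp [colp, setCell]
  · intro i h1 h2
    simp only [colp, List.getElem_map, List.getElem_set]
    unfold setCell
    simp only [colp, setCell, List.length_map, List.length_modify] at h1
    rw [List.getElem_modify]
    by_cases h : r = i
    · subst h
      rw [if_pos rfl, if_pos rfl]
      rw [List.getD_eq_getElem _ _ hr] at hc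
      rw [List.getD_eq_getElem _ _ (by simpa using hc)]
      simp
    · rw [if_neg h, if_neg h]

theorem colp_setCell_ne (g : List (List String)) (r c : Nat) (v : String)
    (c' : Nat) (hne : c' ≠ c) :
    colp (setCell g r c v) c' = colp g c' := by
  apply List.ext_getElem
  · simp [colp, setCell]
  · intro i h1 h2
    simp only [colp, List.getElem_map]
    unfold setCell
    rw [List.getElem_modify]
    by_cases h : r = i
    · subst h
      rw [if_pos rfl, List.getD_eq_getElem?_getD, List.getD_eq_getElem?_getD,
        List.getElem?_set_ne (fun hx => hne hx.symm)]
    · rw [if_neg h]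


-- projections of A's four while loops
theorem whileDown_proj (n m : Nat) : ∀ (fuel : Nat) (g : List (List String)) (c d : Nat)
    (v : String), n ≤ d + fuel → Shape g n m → c < m →
    dimsEq (whileDown g c d n v) g ∧
    colp (whileDown g c d n v) c = w1F (colp g c) d n v ∧
    ∀ c', c' ≠ c → colp (whileDown g c d n v) c' = colp g c' := by
  intro fuel
  induction fuel with
  | zero =>
    intro g c d v hf hs hc
    rw [whileDown, w1F, dif_neg (by omega), dif_neg (by omega)]
    exact ⟨dimsEq_refl g, rfl, fun _ _ => rfl⟩
  | succ fuel ih =>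
    intro g c d v hf hs hc
    rw [whileDown, w1F]
    by_cases hlt : d + 1 < n
    · rw [dif_pos hlt, dif_pos hlt, ← getCell_colp]
      by_cases hq : getCell g (d+1) c = "?"
      · rw [if_pos hq, if_pos hq]
        have hset : colp (setCell g (d+1) c v) c = (colp g c).set (d+1) v :=
          colp_setCell_self _ _ _ _ (by have := hs.1; omega)
            (lt_of_lt_of_le hc (hs.2 (d+1) hlt))
        obtain ⟨ihd, ihc, ihn⟩ := ih (setCell g (d+1) c v) c (d+1) v (by omega)
          (Shape_of_dimsEq (dimsEq_setCell ..) hs) hc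
        refine ⟨dimsEq_trans ihd (dimsEq_setCell ..), ?_, ?_⟩
        · rw [ihc, hset]
        · intro c' hcc
          rw [ihn c' hcc, colp_setCell_ne _ _ _ _ _ hcc]
      · rw [if_neg hq, if_neg hq]
        exact ⟨dimsEq_refl g, rfl, fun _ _ => rfl⟩
    · rw [dif_neg hlt, dif_neg hlt]
      exact ⟨dimsEq_refl g, rfl, fun _ _ => rfl⟩

theorem whileUp_proj (n m : Nat) : ∀ (d : Nat) (g : List (List String)) (c : Nat)
    (v : String), d ≤ n → Shape g n m → c < m →
    dimsEq (whileUp g c d v) g ∧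
    colp (whileUp g c d v) c = w1B (colp g c) d v ∧
    ∀ c', c' ≠ c → colp (whileUp g c d v) c' = colp g c' := by
  intro d
  induction d with
  | zero =>
    intro g c v hd hs hc
    rw [whileUp, w1B]
    exact ⟨dimsEq_refl g, rfl, fun _ _ => rfl⟩
  | succ d ih =>
    intro g c v hd hs hc
    rw [whileUp, w1B, ← getCell_colp]
    by_cases hq : getCell g d c = "?"
    · rw [if_pos hq, if_pos hq]
      have hset : colp (setCell g d c v) c = (colp g c).set d v :=
        colp_setCell_self _ _ _ _ (by have := hs.1; omega)
          (lt_of_lt_of_le hc (hs.2 d (by omega)))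
      obtain ⟨ihd, ihc, ihn⟩ := ih (setCell g d c v) c v (by omega)
        (Shape_of_dimsEq (dimsEq_setCell ..) hs) hc
      refine ⟨dimsEq_trans ihd (dimsEq_setCell ..), ?_, ?_⟩
      · rw [ihc, hset]
      · intro c' hcc
        rw [ihn c' hcc, colp_setCell_ne _ _ _ _ _ hcc]
    · rw [if_neg hq, if_neg hq]
      exact ⟨dimsEq_refl g, rfl, fun _ _ => rfl⟩

theorem whileLeft_proj : ∀ (d : Nat) (g : List (List String)) (r : Nat) (v : String),
    (whileLeft g r d v).length = g.length ∧
    ∀ r', rowp (whileLeft g r d v) r' = if r' = r then w1B (rowp g r) d v else rowp g r' := by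
  intro d
  induction d with
  | zero =>
    intro g r v
    rw [whileLeft]
    refine ⟨rfl, fun r' => ?_⟩
    rw [w1B]
    by_cases h : r' = r
    · rw [if_pos h, h]
    · rw [if_neg h]
  | succ d ih =>
    intro g r v
    rw [whileLeft, getCell_rowp]
    by_cases hq : (rowp g r).getD d "" = "?"
    · rw [if_pos hq]
      obtain ⟨ihl, ihr⟩ := ih (setCell g r d v) r v
      have hrow : rowp (setCell g r d v) r = (rowp g r).set d v := by
        rw [rowp_setCell, if_pos rfl]
      refine ⟨ihl.trans (length_setCell ..), fun r' => ?_⟩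
      rw [ihr r']
      by_cases h : r' = r
      · rw [if_pos h, if_pos h, hrow, w1B, if_pos hq]
      · rw [if_neg h, if_neg h, rowp_setCell, if_neg h]
    · rw [if_neg hq]
      refine ⟨rfl, fun r' => ?_⟩
      rw [w1B, if_neg hq]
      by_cases h : r' = r
      · rw [if_pos h, h]
      · rw [if_neg h]

theorem whileRight_proj (m : Nat) : ∀ (fuel : Nat) (g : List (List String)) (r d : Nat)
    (v : String), m ≤ d + fuel →
    (whileRight g r d m v).length = g.length ∧
    ∀ r', rowp (whileRight g r d m v) r' = if r' = r then w1F (rowp g r) d m v else rowp g r' := by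
  intro fuel
  induction fuel with
  | zero =>
    intro g r d v hf
    rw [whileRight, dif_neg (by omega)]
    refine ⟨rfl, fun r' => ?_⟩
    rw [w1F, dif_neg (by omega)]
    by_cases h : r' = r
    · rw [if_pos h, h]
    · rw [if_neg h]
  | succ fuel ih =>
    intro g r d v hf
    rw [whileRight]
    by_cases hlt : d + 1 < m
    · rw [dif_pos hlt, getCell_rowp]
      by_cases hq : (rowp g r).getD (d+1) "" = "?"
      · rw [if_pos hq]
        obtain ⟨ihl, ihr⟩ := ih (setCell g r (d+1) v) r (d+1) v (by omega)
        have hrow : rowp (setCell g r (d+1) v) r = (rowp g r).set (d+1) v := by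
          rw [rowp_setCell, if_pos rfl]
        refine ⟨ihl.trans (length_setCell ..), fun r' => ?_⟩
        rw [ihr r']
        by_cases h : r' = r
        · rw [if_pos h, if_pos h, hrow]
          conv_rhs => rw [w1F]
          rw [dif_pos hlt, if_pos hq]
        · rw [if_neg h, if_neg h, rowp_setCell, if_neg h]
      · rw [if_neg hq]
        refine ⟨rfl, fun r' => ?_⟩
        rw [w1F, dif_pos hlt, if_neg hq]
        by_cases h : r' = r
        · rw [if_pos h, h]
        · rw [if_neg h]
    · rw [dif_neg hlt]
      refine ⟨rfl, fun r' => ?_⟩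
      rw [w1F, dif_neg hlt]
      by_cases h : r' = r
      · rw [if_pos h, h]
      · rw [if_neg h]

-- ---------- fold projections ----------
theorem colfold (n m : Nat) (F : List (List String) → Nat → List (List String))
    (f : List String → List String)
    (hF : ∀ g c, Shape g n m → c < m →
        dimsEq (F g c) g ∧ colp (F g c) c = f (colp g c) ∧
        ∀ c', c' ≠ c → colp (F g c) c' = colp g c') :
    ∀ (cs : List Nat), cs.Nodup → (∀ c ∈ cs, c < m) → ∀ g, Shape g n m →
      dimsEq (cs.foldl F g) g ∧
      ∀ c', colp (cs.foldl F g) c' = if c' ∈ cs then f (colp g c') else colp g c' := by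
  intro cs
  induction cs with
  | nil =>
    intro _ _ g _
    exact ⟨dimsEq_refl g, fun c' => by simp⟩
  | cons c0 cs ih =>
    intro hnd hmem g hs
    rw [List.foldl_cons]
    obtain ⟨hd0, hself, hne⟩ := hF g c0 hs (hmem c0 (by simp))
    obtain ⟨ihd, ihc⟩ := ih (List.Nodup.of_cons hnd) (fun c hc => hmem c (by simp [hc]))
      (F g c0) (Shape_of_dimsEq hd0 hs)
    refine ⟨dimsEq_trans ihd hd0, fun c' => ?_⟩
    rw [ihc c']
    by_cases hin : c' ∈ cs
    · have hcc : c' ≠ c0 := by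
        rintro rfl
        exact (List.nodup_cons.mp hnd).1 hin
      rw [if_pos hin, if_pos (by simp [hin]), hne c' hcc]
    · rw [if_neg hin]
      by_cases he : c' = c0
      · subst he
        rw [if_pos (by simp), hself]
      · rw [if_neg (by simp [he, hin]), hne c' he]

theorem vpass (n m : Nat) (step2 : List (List String) → Nat → Nat → List (List String))
    (f1 : Nat → List String → List String)
    (hstep : ∀ g r c, Shape g n m → r < n → c < m →
        dimsEq (step2 g r c) g ∧ colp (step2 g r c) c = f1 r (colp g c) ∧
        ∀ c', c' ≠ c → colp (step2 g r c) c' = colp g c') :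
    ∀ (rs : List Nat), (∀ r ∈ rs, r < n) → ∀ g, Shape g n m →
      dimsEq (rs.foldl (fun g r => (List.range m).foldl (fun g c => step2 g r c) g) g) g ∧
      ∀ c', colp (rs.foldl (fun g r => (List.range m).foldl (fun g c => step2 g r c) g) g) c' =
        if c' < m then rs.foldl (fun ℓ r => f1 r ℓ) (colp g c') else colp g c' := by
  intro rs
  induction rs with
  | nil =>
    intro _ g _
    refine ⟨dimsEq_refl g, fun c' => ?_⟩
    rw [List.foldl_nil, List.foldl_nil]
    split <;> rfl
  | cons r0 rs ih =>
    intro hmem g hs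
    rw [List.foldl_cons]
    have hr0 : r0 < n := hmem r0 (by simp)
    obtain ⟨hd0, hc0⟩ := colfold n m (fun g c => step2 g r0 c) (f1 r0)
      (fun g c hsg hcg => hstep g r0 c hsg hr0 hcg) (List.range m) List.nodup_range
      (fun c hc => List.mem_range.mp hc) g hs
    obtain ⟨ihd, ihc⟩ := ih (fun r hr => hmem r (by simp [hr])) _ (Shape_of_dimsEq hd0 hs)
    refine ⟨dimsEq_trans ihd hd0, fun c' => ?_⟩
    rw [ihc c', hc0 c']
    by_cases hlt : c' < m
    · rw [if_pos (List.mem_range.mpr hlt), if_pos hlt, if_pos hlt, List.foldl_cons]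
    · rw [if_neg hlt, if_neg hlt, if_neg (show c' ∉ List.range m from by simpa using hlt)]

theorem hfold (F : List (List String) → Nat → List (List String))
    (f : List String → Nat → List String) (r : Nat)
    (hF : ∀ g c, (F g c).length = g.length ∧
        ∀ r', rowp (F g c) r' = if r' = r then f (rowp g r) c else rowp g r') :
    ∀ (cs : List Nat) (g : List (List String)),
      (cs.foldl F g).length = g.length ∧
      ∀ r', rowp (cs.foldl F g) r' = if r' = r then cs.foldl f (rowp g r) else rowp g r' := by
  intro cs
  induction cs with
  | nil =>
    intro g
    refine ⟨rfl, fun r' => ?_⟩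
    rw [List.foldl_nil, List.foldl_nil]
    by_cases h : r' = r
    · rw [if_pos h, h]
    · rw [if_neg h]
  | cons c0 cs ih =>
    intro g
    rw [List.foldl_cons, List.foldl_cons]
    obtain ⟨hl0, hr0⟩ := hF g c0
    obtain ⟨ihl, ihr⟩ := ih (F g c0)
    refine ⟨ihl.trans hl0, fun r' => ?_⟩
    rw [ihr r']
    by_cases h : r' = r
    · rw [if_pos h, if_pos h, hr0 r, if_pos rfl]
    · rw [if_neg h, if_neg h, hr0 r', if_neg h]

theorem hpass (n : Nat) (F2 : List (List String) → Nat → List (List String))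
    (f1 : Nat → List String → List String)
    (hF2 : ∀ g r, (F2 g r).length = g.length ∧
        ∀ r', rowp (F2 g r) r' = if r' = r then f1 r (rowp g r) else rowp g r') :
    ∀ (rs : List Nat), rs.Nodup → ∀ g,
      (rs.foldl F2 g).length = g.length ∧
      ∀ r', rowp (rs.foldl F2 g) r' = if r' ∈ rs then f1 r' (rowp g r') else rowp g r' := by
  intro rs
  induction rs with
  | nil =>
    intro _ g
    exact ⟨rfl, fun r' => by simp⟩
  | cons r0 rs ih =>
    intro hnd g
    rw [List.foldl_cons]
    obtain ⟨hl0, hr0⟩ := hF2 g r0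
    obtain ⟨ihl, ihr⟩ := ih (List.Nodup.of_cons hnd) (F2 g r0)
    refine ⟨ihl.trans hl0, fun r' => ?_⟩
    rw [ihr r']
    by_cases hin : r' ∈ rs
    · have hne : r' ≠ r0 := by
        rintro rfl
        exact (List.nodup_cons.mp hnd).1 hin
      rw [if_pos hin, if_pos (by simp [hin]), hr0 r', if_neg hne]
    · rw [if_neg hin]
      by_cases he : r' = r0
      · subst he
        rw [if_pos (by simp), hr0 r', if_pos rfl]
      · rw [if_neg (by simp [he, hin]), hr0 r', if_neg he]

theorem setfold (n m : Nat) (w : List String) (c : Nat) :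
    ∀ (rs : List Nat) (g : List (List String)), (∀ r ∈ rs, r < n) → Shape g n m → c < m →
      dimsEq (rs.foldl (fun g r => setCell g r c (w.getD r "?")) g) g ∧
      colp (rs.foldl (fun g r => setCell g r c (w.getD r "?")) g) c =
        rs.foldl (fun ℓ r => ℓ.set r (w.getD r "?")) (colp g c) ∧
      ∀ c', c' ≠ c → colp (rs.foldl (fun g r => setCell g r c (w.getD r "?")) g) c' = colp g c' := by
  intro rs
  induction rs with
  | nil =>
    intro g _ _ _
    exact ⟨dimsEq_refl g, rfl, fun _ _ => rfl⟩
  | cons r0 rs ih =>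
    intro g hmem hs hc
    rw [List.foldl_cons, List.foldl_cons]
    have hr0 : r0 < n := hmem r0 (by simp)
    have hset : colp (setCell g r0 c (w.getD r0 "?")) c = (colp g c).set r0 (w.getD r0 "?") :=
      colp_setCell_self _ _ _ _ (by have := hs.1; omega) (lt_of_lt_of_le hc (hs.2 r0 hr0))
    obtain ⟨ihd, ihc, ihn⟩ := ih (setCell g r0 c (w.getD r0 "?"))
      (fun r hr => hmem r (by simp [hr])) (Shape_of_dimsEq (dimsEq_setCell ..) hs) hc
    refine ⟨dimsEq_trans ihd (dimsEq_setCell ..), ?_, ?_⟩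
    · rw [ihc, hset]
    · intro c' hcc
      rw [ihn c' hcc, colp_setCell_ne _ _ _ _ _ hcc]

theorem foldset_getElem? (w : List String) : ∀ (rs : List Nat) (ℓ : List String) (i : Nat),
    (rs.foldl (fun ℓ r => ℓ.set r (w.getD r "?")) ℓ)[i]? =
      if i ∈ rs ∧ i < ℓ.length then some (w.getD i "?") else ℓ[i]? := by
  intro rs
  induction rs with
  | nil => intro ℓ i; simp
  | cons r0 rs ih =>
    intro ℓ i
    rw [List.foldl_cons, ih, List.length_set]
    by_cases hlen : i < ℓ.length
    · by_cases hin : i ∈ rs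
      · rw [if_pos ⟨hin, hlen⟩, if_pos ⟨by simp [hin], hlen⟩]
      · rw [if_neg (show ¬(i ∈ rs ∧ i < ℓ.length) from by tauto)]
        by_cases he : r0 = i
        · subst he
          rw [if_pos ⟨by simp, hlen⟩, List.getElem?_set_self hlen]
        · rw [List.getElem?_set_ne he,
            if_neg (show ¬(i ∈ r0 :: rs ∧ i < ℓ.length) from by
              rintro ⟨hm, -⟩
              rcases List.mem_cons.mp hm with h | h
              exacts [he h.symm, hin h])]
    · rw [if_neg (show ¬(i ∈ rs ∧ i < ℓ.length) from by tauto),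
        if_neg (show ¬(i ∈ r0 :: rs ∧ i < ℓ.length) from by tauto), List.getElem?_set]
      by_cases he : r0 = i
      · rw [if_pos he, if_neg (by omega), List.getElem?_eq_none (l := ℓ) (by omega)]
      · rw [if_neg he]

theorem setrange (n : Nat) (w ℓ : List String) (hw : w.length = n) (hl : n ≤ ℓ.length) :
    (List.range n).foldl (fun ℓ r => ℓ.set r (w.getD r "?")) ℓ = w ++ ℓ.drop n := by
  subst hw
  apply List.ext_getElem?
  intro i
  rw [foldset_getElem?]
  by_cases hi : i < w.length
  · rw [if_pos ⟨List.mem_range.mpr hi, by omega⟩, List.getElem?_append_left (by omega),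
      List.getD_eq_getElem _ _ (by omega), List.getElem?_eq_getElem (by omega)]
  · rw [if_neg (by simp [hi])]
    rcases lt_or_ge i ℓ.length with h | h
    · rw [List.getElem?_append_right (by omega), List.getElem?_eq_getElem (l := ℓ) (by omega),
        List.getElem?_eq_getElem (show i - w.length < (ℓ.drop w.length).length from by rw [List.length_drop]; omega),
        List.getElem_drop]
      have he : w.length + (i - w.length) = i := by omega
      simp [he]
    · rw [List.getElem?_eq_none (l := ℓ) (by omega),
        List.getElem?_eq_none (l := w ++ ℓ.drop w.length) (by simp; omega)]

theorem maptake (ℓ : List String) (n : Nat) (h : n ≤ ℓ.length) :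
    (List.range n).map (fun r => ℓ.getD r "") = ℓ.take n := by
  apply List.ext_getElem
  · simp; omega
  · intro i h1 h2
    simp only [List.getElem_map, List.getElem_range, List.getElem_take]
    rw [List.getD_eq_getElem _ _ (by simp at h1; omega)]

theorem gext_col (g h : List (List String)) (hlen : g.length = h.length)
    (hrow : ∀ r, (g.getD r []).length = (h.getD r []).length)
    (hcol : ∀ c, colp g c = colp h c) : g = h := by
  apply List.ext_getElem hlen
  intro r h1 h2
  apply List.ext_getElem
  · have := hrow r
    rwa [List.getD_eq_getElem _ _ h1, List.getD_eq_getElem _ _ h2] at this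
  · intro c hc1 hc2
    have := congrArg (fun ℓ => ℓ.getD r "") (hcol c)
    simp only [colp] at this
    rw [List.getD_eq_getElem _ _ (by simpa using h1), List.getD_eq_getElem _ _ (by simpa using h2),
      List.getElem_map, List.getElem_map] at this
    rwa [List.getD_eq_getElem _ _ hc1, List.getD_eq_getElem _ _ hc2] at this

theorem gext_row (g h : List (List String)) (hlen : g.length = h.length)
    (hrow : ∀ r, rowp g r = rowp h r) : g = h := by
  apply List.ext_getElem hlen
  intro r h1 h2
  have := hrow r
  unfold rowp at this
  rwa [List.getD_eq_getElem _ _ h1, List.getD_eq_getElem _ _ h2] at this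

-- ---------- the four passes of A and the two loops of B, as proof-side names ----------
def passA1 (n m : Nat) (g : List (List String)) : List (List String) :=
  (List.range n).foldl (fun g r => (List.range m).foldl (fun g c =>
      let i := getCell g r c; if i ≠ "?" then whileDown g c r n i else g) g) g

def passA2 (n m : Nat) (g : List (List String)) : List (List String) :=
  (List.range n).reverse.foldl (fun g r => (List.range m).foldl (fun g c =>
      let i := getCell g r c; if i ≠ "?" then whileUp g c r i else g) g) g

def passA3 (n m : Nat) (g : List (List String)) : List (List String) :=
  (List.range n).reverse.foldl (fun g r => (List.range m).reverse.foldl (fun g c =>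
      let i := getCell g r c; if i ≠ "?" then whileLeft g r c i else g) g) g

def passA4 (n m : Nat) (g : List (List String)) : List (List String) :=
  (List.range n).foldl (fun g r => (List.range m).reverse.foldl (fun g c =>
      let i := getCell g r c; if i ≠ "?" then whileRight g r c m i else g) g) g

def passBv (n m : Nat) (g : List (List String)) : List (List String) :=
  (List.range m).foldl (fun g c =>
      let col0 := (List.range n).map (fun r => getCell g r c)
      let col1 := fillLine col0
      let col2 := (fillLine col1.reverse).reverse
      (List.range n).foldl (fun g r => setCell g r c (col2.getD r "?")) g) g

def passBh (n m : Nat) (g : List (List String)) : List (List String) :=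
  (List.range n).foldl (fun g r =>
      let row0 := (g.getD r []).take m
      let row1 := (fillLine row0.reverse).reverse
      let row2 := fillLine row1
      g.modify r (fun old => row2 ++ old.drop m)) g

theorem solve_decomp (rows cols : Int) (grid : List (List String)) :
    solve rows cols grid =
      passA4 rows.toNat cols.toNat (passA3 rows.toNat cols.toNat
        (passA2 rows.toNat cols.toNat (passA1 rows.toNat cols.toNat grid))) := rfl

theorem solve_alt_decomp (rows cols : Int) (grid : List (List String)) :
    solve_alt rows cols grid =
      if rows ≤ 0 ∨ cols ≤ 0 then grid
      else passBh rows.toNat cols.toNat (passBv rows.toNat cols.toNat grid) := rfl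

-- ---------- characterisations of the passes ----------
theorem passA1_char (n m : Nat) (g : List (List String)) (hs : Shape g n m) :
    dimsEq (passA1 n m g) g ∧ ∀ c', colp (passA1 n m g) c' =
      if c' < m then fillWith none ((colp g c').take n) ++ (colp g c').drop n else colp g c' := by
  have hstep : ∀ g r c, Shape g n m → r < n → c < m →
      dimsEq (if getCell g r c ≠ "?" then whileDown g c r n (getCell g r c) else g) g ∧
      colp (if getCell g r c ≠ "?" then whileDown g c r n (getCell g r c) else g) c =
        stepF n (colp g c) r ∧
      ∀ c', c' ≠ c →
        colp (if getCell g r c ≠ "?" then whileDown g c r n (getCell g r c) else g) c' =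
          colp g c' := by
    intro g r c hsg hr hc
    by_cases hq : getCell g r c = "?"
    · rw [if_neg (by simpa using hq), stepF_skip n _ r (by rw [← getCell_colp]; exact hq)]
      exact ⟨dimsEq_refl g, rfl, fun _ _ => rfl⟩
    · rw [if_pos (by simpa using hq), stepF_src n _ r (getCell g r c) (by rw [← getCell_colp]) hq]
      exact whileDown_proj n m n g c r (getCell g r c) (by omega) hsg hc
  obtain ⟨hd, hc⟩ := vpass n m
    (fun g r c => let i := getCell g r c; if i ≠ "?" then whileDown g c r n i else g)
    (fun r ℓ => stepF n ℓ r) hstep (List.range n) (fun r hr => List.mem_range.mp hr) g hs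
  refine ⟨hd, fun c' => ?_⟩
  have h1 : colp (passA1 n m g) c' =
      if c' < m then (List.range n).foldl (fun ℓ r => stepF n ℓ r) (colp g c') else colp g c' :=
    hc c'
  rw [h1]
  by_cases hm : c' < m
  · rw [if_pos hm, if_pos hm]
    have he : (List.range n).foldl (fun ℓ r => stepF n ℓ r) (colp g c') =
        (List.range n).foldl (stepF n) (colp g c') := rfl
    rw [he, passAscF_char n (colp g c') (by rw [length_colp]; exact hs.1)]
  · rw [if_neg hm, if_neg hm]

theorem passA2_char (n m : Nat) (g : List (List String)) (hs : Shape g n m) :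
    dimsEq (passA2 n m g) g ∧ ∀ c', colp (passA2 n m g) c' =
      if c' < m then (fillWith none (((colp g c').take n).reverse)).reverse ++ (colp g c').drop n
      else colp g c' := by
  have hstep : ∀ g r c, Shape g n m → r < n → c < m →
      dimsEq (if getCell g r c ≠ "?" then whileUp g c r (getCell g r c) else g) g ∧
      colp (if getCell g r c ≠ "?" then whileUp g c r (getCell g r c) else g) c =
        stepB (colp g c) r ∧
      ∀ c', c' ≠ c →
        colp (if getCell g r c ≠ "?" then whileUp g c r (getCell g r c) else g) c' =
          colp g c' := by
    intro g r c hsg hr hc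
    by_cases hq : getCell g r c = "?"
    · rw [if_neg (by simpa using hq), stepB_skip _ r (by rw [← getCell_colp]; exact hq)]
      exact ⟨dimsEq_refl g, rfl, fun _ _ => rfl⟩
    · rw [if_pos (by simpa using hq), stepB_src _ r (getCell g r c) (by rw [← getCell_colp]) hq]
      exact whileUp_proj n m r g c (getCell g r c) (by omega) hsg hc
  obtain ⟨hd, hc⟩ := vpass n m
    (fun g r c => let i := getCell g r c; if i ≠ "?" then whileUp g c r i else g)
    (fun r ℓ => stepB ℓ r) hstep (List.range n).reverse
    (fun r hr => List.mem_range.mp (List.mem_reverse.mp hr)) g hs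
  refine ⟨hd, fun c' => ?_⟩
  have h1 : colp (passA2 n m g) c' =
      if c' < m then (List.range n).reverse.foldl (fun ℓ r => stepB ℓ r) (colp g c')
      else colp g c' := hc c'
  rw [h1]
  by_cases hm : c' < m
  · rw [if_pos hm, if_pos hm]
    have he : (List.range n).reverse.foldl (fun ℓ r => stepB ℓ r) (colp g c') =
        (List.range n).reverse.foldl stepB (colp g c') := rfl
    rw [he, passDescB_char n (colp g c') (by rw [length_colp]; exact hs.1)]
  · rw [if_neg hm, if_neg hm]

theorem passA3_char (n m : Nat) (g : List (List String)) (hs : Shape g n m) :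
    (passA3 n m g).length = g.length ∧ ∀ r', rowp (passA3 n m g) r' =
      if r' < n then
        (fillWith none (((rowp g r').take m).reverse)).reverse ++ (rowp g r').drop m
      else rowp g r' := by
  have hF2 : ∀ g r, ((List.range m).reverse.foldl (fun g c =>
        let i := getCell g r c; if i ≠ "?" then whileLeft g r c i else g) g).length = g.length ∧
      ∀ r', rowp ((List.range m).reverse.foldl (fun g c =>
          let i := getCell g r c; if i ≠ "?" then whileLeft g r c i else g) g) r' =
        if r' = r then (List.range m).reverse.foldl (fun ℓ c => stepB ℓ c) (rowp g r)
        else rowp g r' := by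
    intro g r
    have hstep : ∀ g c,
        (if getCell g r c ≠ "?" then whileLeft g r c (getCell g r c) else g).length = g.length ∧
        ∀ r', rowp (if getCell g r c ≠ "?" then whileLeft g r c (getCell g r c) else g) r' =
          if r' = r then stepB (rowp g r) c else rowp g r' := by
      intro g c
      by_cases hq : getCell g r c = "?"
      · refine ⟨by rw [if_neg (by simpa using hq)], fun r' => ?_⟩
        rw [if_neg (show ¬getCell g r c ≠ "?" from by simpa using hq),
          stepB_skip _ c (by rw [← getCell_rowp]; exact hq)]
        by_cases h : r' = r
        · rw [if_pos h, h]
        · rw [if_neg h]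
      · rw [if_pos (by simpa using hq), stepB_src _ c (getCell g r c) (by rw [← getCell_rowp]) hq]
        exact whileLeft_proj c g r (getCell g r c)
    exact hfold (fun g c => let i := getCell g r c; if i ≠ "?" then whileLeft g r c i else g)
      (fun ℓ c => stepB ℓ c) r hstep (List.range m).reverse g
  obtain ⟨hl, hr⟩ := hpass n _ (fun r ℓ => (List.range m).reverse.foldl (fun ℓ c => stepB ℓ c) ℓ)
    hF2 (List.range n).reverse (List.nodup_reverse.mpr List.nodup_range) g
  refine ⟨hl, fun r' => ?_⟩
  have h1 : rowp (passA3 n m g) r' =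
      if r' ∈ (List.range n).reverse then
        (List.range m).reverse.foldl (fun ℓ c => stepB ℓ c) (rowp g r')
      else rowp g r' := hr r'
  rw [h1]
  by_cases hn : r' < n
  · rw [if_pos (by rw [List.mem_reverse, List.mem_range]; exact hn), if_pos hn]
    have he : (List.range m).reverse.foldl (fun ℓ c => stepB ℓ c) (rowp g r') =
        (List.range m).reverse.foldl stepB (rowp g r') := rfl
    rw [he, passDescB_char m (rowp g r') (hs.2 r' hn)]
  · rw [if_neg (by rw [List.mem_reverse, List.mem_range]; exact hn), if_neg hn]

theorem passA4_char (n m : Nat) (g : List (List String)) (hs : Shape g n m) :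
    (passA4 n m g).length = g.length ∧ ∀ r', rowp (passA4 n m g) r' =
      if r' < n then fillWith none ((rowp g r').take m) ++ (rowp g r').drop m
      else rowp g r' := by
  have hF2 : ∀ g r, ((List.range m).reverse.foldl (fun g c =>
        let i := getCell g r c; if i ≠ "?" then whileRight g r c m i else g) g).length = g.length ∧
      ∀ r', rowp ((List.range m).reverse.foldl (fun g c =>
          let i := getCell g r c; if i ≠ "?" then whileRight g r c m i else g) g) r' =
        if r' = r then (List.range m).reverse.foldl (fun ℓ c => stepF m ℓ c) (rowp g r)
        else rowp g r' := by
    intro g r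
    have hstep : ∀ g c,
        (if getCell g r c ≠ "?" then whileRight g r c m (getCell g r c) else g).length = g.length ∧
        ∀ r', rowp (if getCell g r c ≠ "?" then whileRight g r c m (getCell g r c) else g) r' =
          if r' = r then stepF m (rowp g r) c else rowp g r' := by
      intro g c
      by_cases hq : getCell g r c = "?"
      · refine ⟨by rw [if_neg (by simpa using hq)], fun r' => ?_⟩
        rw [if_neg (show ¬getCell g r c ≠ "?" from by simpa using hq),
          stepF_skip m _ c (by rw [← getCell_rowp]; exact hq)]
        by_cases h : r' = r
        · rw [if_pos h, h]
        · rw [if_neg h]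
      · rw [if_pos (by simpa using hq), stepF_src m _ c (getCell g r c) (by rw [← getCell_rowp]) hq]
        exact whileRight_proj m m g r c (getCell g r c) (by omega)
    exact hfold (fun g c => let i := getCell g r c; if i ≠ "?" then whileRight g r c m i else g)
      (fun ℓ c => stepF m ℓ c) r hstep (List.range m).reverse g
  obtain ⟨hl, hr⟩ := hpass n _ (fun r ℓ => (List.range m).reverse.foldl (fun ℓ c => stepF m ℓ c) ℓ)
    hF2 (List.range n) List.nodup_range g
  refine ⟨hl, fun r' => ?_⟩
  have h1 : rowp (passA4 n m g) r' =
      if r' ∈ List.range n then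
        (List.range m).reverse.foldl (fun ℓ c => stepF m ℓ c) (rowp g r')
      else rowp g r' := hr r'
  rw [h1]
  by_cases hn : r' < n
  · rw [if_pos (List.mem_range.mpr hn), if_pos hn]
    have he : (List.range m).reverse.foldl (fun ℓ c => stepF m ℓ c) (rowp g r') =
        (List.range m).reverse.foldl (stepF m) (rowp g r') := rfl
    rw [he, passDescF_char m (rowp g r') (hs.2 r' hn)]
  · rw [if_neg (by simpa using hn), if_neg hn]

theorem fillLine_nil : fillLine [] = [] := rfl

theorem length_fillLine (s : List String) : (fillLine s).length = s.length := by
  rw [fillLine_eq]; exact length_fillWith ..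

theorem rowp_modify (g : List (List String)) (r : Nat) (f : List String → List String)
    (r' : Nat) :
    rowp (g.modify r f) r' = if r' = r ∧ r < g.length then f (rowp g r) else rowp g r' := by
  unfold rowp
  rw [List.getD_eq_getElem?_getD (l := g.modify r f), List.getElem?_modify]
  rcases lt_or_ge r' g.length with hlt | hge
  · rw [List.getElem?_eq_getElem hlt]
    by_cases h : r' = r
    · subst h
      rw [if_pos ⟨rfl, hlt⟩]
      simp [List.getElem?_eq_getElem hlt]
    · rw [if_neg (by tauto)]
      simp only [Option.map_eq_map, Option.map_some, Option.getD_some,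
        if_neg (show r ≠ r' from fun hx => h hx.symm)]
      rw [List.getD_eq_getElem _ _ hlt]
  · rw [List.getElem?_eq_none (l := g) (by omega)]
    rw [if_neg (by rintro ⟨rfl, hlen⟩; omega)]
    rw [List.getD_eq_getElem?_getD (l := g), List.getElem?_eq_none (l := g) (by omega)]
    rfl

theorem len_bwdline (m : Nat) (ℓ : List String) (h : m ≤ ℓ.length) :
    ((fillWith none ((ℓ.take m).reverse)).reverse ++ ℓ.drop m).length = ℓ.length := by
  simp [length_fillWith]
  omega

theorem passBv_char (n m : Nat) (g : List (List String)) (hs : Shape g n m) :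
    dimsEq (passBv n m g) g ∧ ∀ c', colp (passBv n m g) c' =
      if c' < m then
        (fillLine (fillLine ((colp g c').take n)).reverse).reverse ++ (colp g c').drop n
      else colp g c' := by
  have hF : ∀ g c, Shape g n m → c < m →
      dimsEq ((List.range n).foldl (fun g2 r => setCell g2 r c
        (((fillLine (fillLine ((List.range n).map (fun r => getCell g r c))).reverse).reverse).getD
          r "?")) g) g ∧
      colp ((List.range n).foldl (fun g2 r => setCell g2 r c
        (((fillLine (fillLine ((List.range n).map (fun r => getCell g r c))).reverse).reverse).getD
          r "?")) g) c =
        (fillLine (fillLine ((colp g c).take n)).reverse).reverse ++ (colp g c).drop n ∧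
      ∀ c', c' ≠ c →
        colp ((List.range n).foldl (fun g2 r => setCell g2 r c
          (((fillLine (fillLine ((List.range n).map (fun r => getCell g r c))).reverse).reverse).getD
            r "?")) g) c' = colp g c' := by
    intro g c hsg hc
    have hcol0 : (List.range n).map (fun r => getCell g r c) = (colp g c).take n := by
      rw [show (fun r => getCell g r c) = fun r => (colp g c).getD r "" from
        funext fun r => getCell_colp g r c]
      exact maptake _ _ (by rw [length_colp]; exact hsg.1)
    obtain ⟨hd, hcself, hcne⟩ :=
      setfold n m ((fillLine (fillLine ((List.range n).map (fun r => getCell g r c))).reverse).reverse)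
        c (List.range n) g (fun r hr => List.mem_range.mp hr) hsg hc
    refine ⟨hd, ?_, hcne⟩
    rw [hcself, setrange n _ (colp g c)
      (by rw [List.length_reverse, length_fillLine, List.length_reverse, length_fillLine, hcol0,
        List.length_take, length_colp]; have := hsg.1; omega)
      (by rw [length_colp]; exact hsg.1), hcol0]
  obtain ⟨hd, hc⟩ := colfold n m
    (fun g c =>
      let col0 := (List.range n).map (fun r => getCell g r c)
      let col1 := fillLine col0
      let col2 := (fillLine col1.reverse).reverse
      (List.range n).foldl (fun g r => setCell g r c (col2.getD r "?")) g)
    (fun ℓ => (fillLine (fillLine (ℓ.take n)).reverse).reverse ++ ℓ.drop n)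
    hF (List.range m) List.nodup_range (fun c hcm => List.mem_range.mp hcm) g hs
  refine ⟨hd, fun c' => ?_⟩
  have h1 : colp (passBv n m g) c' =
      if c' ∈ List.range m then
        (fillLine (fillLine ((colp g c').take n)).reverse).reverse ++ (colp g c').drop n
      else colp g c' := hc c'
  rw [h1]
  by_cases hm : c' < m
  · rw [if_pos (List.mem_range.mpr hm), if_pos hm]
  · rw [if_neg (by simpa using hm), if_neg hm]

theorem passBh_char (n m : Nat) (g : List (List String)) :
    (passBh n m g).length = g.length ∧ ∀ r', rowp (passBh n m g) r' =
      if r' < n then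
        fillLine ((fillLine (((rowp g r').take m).reverse)).reverse) ++ (rowp g r').drop m
      else rowp g r' := by
  have hF2 : ∀ g r,
      ((g : List (List String)).modify r (fun old =>
        fillLine ((fillLine (((g.getD r []).take m).reverse)).reverse) ++ old.drop m)).length =
        g.length ∧
      ∀ r', rowp (g.modify r (fun old =>
          fillLine ((fillLine (((g.getD r []).take m).reverse)).reverse) ++ old.drop m)) r' =
        if r' = r then
          fillLine ((fillLine (((rowp g r).take m).reverse)).reverse) ++ (rowp g r).drop m
        else rowp g r' := by
    intro g r
    refine ⟨by simp, fun r' => ?_⟩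
    rw [rowp_modify]
    by_cases h : r' = r
    · subst h
      by_cases hlen : r' < g.length
      · rw [if_pos ⟨rfl, hlen⟩, if_pos rfl]
        rfl
      · rw [if_neg (by rintro ⟨-, h2⟩; omega), if_pos rfl]
        have hnil : rowp g r' = [] := by
          unfold rowp
          rw [List.getD_eq_getElem?_getD, List.getElem?_eq_none (l := g) (by omega)]
          rfl
        rw [hnil]
        simp [fillLine_nil]
    · rw [if_neg (by tauto), if_neg h]
  obtain ⟨hl, hr⟩ := hpass n
    (fun g r =>
      let row0 := (g.getD r []).take m
      let row1 := (fillLine row0.reverse).reverse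
      let row2 := fillLine row1
      g.modify r (fun old => row2 ++ old.drop m))
    (fun r ℓ => fillLine ((fillLine ((ℓ.take m).reverse)).reverse) ++ ℓ.drop m)
    hF2 (List.range n) List.nodup_range g
  refine ⟨hl, fun r' => ?_⟩
  have h1 : rowp (passBh n m g) r' =
      if r' ∈ List.range n then
        fillLine ((fillLine (((rowp g r').take m).reverse)).reverse) ++ (rowp g r').drop m
      else rowp g r' := hr r'
  rw [h1]
  by_cases hn : r' < n
  · rw [if_pos (List.mem_range.mpr hn), if_pos hn]
  · rw [if_neg (by simpa using hn), if_neg hn]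

-- ---------- degenerate sizes ----------
theorem passA1_zero_n (m : Nat) (g : List (List String)) : passA1 0 m g = g := rfl
theorem passA2_zero_n (m : Nat) (g : List (List String)) : passA2 0 m g = g := rfl
theorem passA3_zero_n (m : Nat) (g : List (List String)) : passA3 0 m g = g := rfl
theorem passA4_zero_n (m : Nat) (g : List (List String)) : passA4 0 m g = g := rfl
theorem passA1_zero_m (n : Nat) (g : List (List String)) : passA1 n 0 g = g := by
  unfold passA1
  simp [List.foldl_fixed]

theorem passA2_zero_m (n : Nat) (g : List (List String)) : passA2 n 0 g = g := by
  unfold passA2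
  simp [List.foldl_fixed]

theorem passA3_zero_m (n : Nat) (g : List (List String)) : passA3 n 0 g = g := by
  unfold passA3
  simp [List.foldl_fixed]

theorem passA4_zero_m (n : Nat) (g : List (List String)) : passA4 n 0 g = g := by
  unfold passA4
  simp [List.foldl_fixed]

-- ---------- the two programs agree on a rows×cols region that fits in the grid ----------
theorem main_case (n m : Nat) (grid : List (List String)) (hs : Shape grid n m) :
    passA4 n m (passA3 n m (passA2 n m (passA1 n m grid))) =
      passBh n m (passBv n m grid) := by
  obtain ⟨hd1, hc1⟩ := passA1_char n m grid hs
  have hs1 : Shape (passA1 n m grid) n m := Shape_of_dimsEq hd1 hs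
  obtain ⟨hd2, hc2⟩ := passA2_char n m _ hs1
  have hs2 : Shape (passA2 n m (passA1 n m grid)) n m := Shape_of_dimsEq hd2 hs1
  obtain ⟨hdv, hcv⟩ := passBv_char n m grid hs
  have hg2v : passA2 n m (passA1 n m grid) = passBv n m grid := by
    apply gext_col
    · rw [hd2.1, hd1.1, hdv.1]
    · intro r
      rw [hd2.2 r, hd1.2 r, hdv.2 r]
    · intro c
      rw [hc2 c, hcv c]
      by_cases hc : c < m
      · rw [if_pos hc, if_pos hc, hc1 c, if_pos hc]
        have hF : (fillWith none ((colp grid c).take n)).length = n := by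
          rw [length_fillWith, List.length_take, length_colp]
          have := hs.1
          omega
        rw [List.take_left' hF, List.drop_left' hF, fillLine_eq, fillLine_eq]
      · rw [if_neg hc, if_neg hc, hc1 c, if_neg hc]
  obtain ⟨hl3, hr3⟩ := passA3_char n m _ hs2
  have hd3 : dimsEq (passA3 n m (passA2 n m (passA1 n m grid)))
      (passA2 n m (passA1 n m grid)) := by
    refine ⟨hl3, fun r => ?_⟩
    show (rowp _ r).length = (rowp _ r).length
    rw [hr3 r]
    by_cases hr : r < n
    · rw [if_pos hr]
      exact len_bwdline m _ (hs2.2 r hr)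
    · rw [if_neg hr]
  have hs3 : Shape (passA3 n m (passA2 n m (passA1 n m grid))) n m := Shape_of_dimsEq hd3 hs2
  obtain ⟨hl4, hr4⟩ := passA4_char n m _ hs3
  rw [← hg2v]
  obtain ⟨hlB, hrB⟩ := passBh_char n m (passA2 n m (passA1 n m grid))
  apply gext_row
  · rw [hl4, hl3, hlB]
  · intro r
    rw [hr4 r, hrB r]
    by_cases hr : r < n
    · rw [if_pos hr, if_pos hr, hr3 r, if_pos hr]
      have hB : ((fillWith none
          (((rowp (passA2 n m (passA1 n m grid)) r).take m).reverse)).reverse).length = m := by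
        rw [List.length_reverse, length_fillWith, List.length_reverse, List.length_take]
        have := hs2.2 r hr
        show min m ((passA2 n m (passA1 n m grid)).getD r []).length = m
        omega
      rw [List.take_left' hB, List.drop_left' hB, fillLine_eq, fillLine_eq]
    · rw [if_neg hr, if_neg hr, hr3 r, if_neg hr]

theorem solve_eq_alt (rows cols : Int) (grid : List (List String))
    (hpre : Pre_solve rows cols grid) : solve rows cols grid = solve_alt rows cols grid := by
  rw [solve_decomp, solve_alt_decomp]
  by_cases h0 : rows ≤ 0 ∨ cols ≤ 0
  · rw [if_pos h0]
    rcases h0 with h | h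
    · have hn : rows.toNat = 0 := by omega
      rw [hn, passA1_zero_n, passA2_zero_n, passA3_zero_n, passA4_zero_n]
    · have hm : cols.toNat = 0 := by omega
      rw [hm, passA1_zero_m, passA2_zero_m, passA3_zero_m, passA4_zero_m]
  · rw [if_neg h0]
    apply main_case
    rcases hpre with h | h | h
    · exact absurd (Or.inl h) h0
    · exact absurd (Or.inr h) h0
    · exact ⟨h.1, h.2⟩

-- ===== VERDICT (by name: the statement is the Claim_ definition above) =====
theorem solve_spec : Claim_equal_solve := by
  intro rows cols grid _ hpre
  show solve rows cols grid = solve_alt rows cols grid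
  exact solve_eq_alt rows cols grid hpre
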